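-- pv_equiv track=rewrite | github.com/ThomasHoek/AdventsOfCode | 2016/day1/day1.2.py | tuple_xy_add
-- ===== SOURCE A (Python) =====
-- from typing import Any, Literal
--
-- def tuple_xy_add(rot: int, amount: int, loc: tuple[int, int]) -> tuple[Literal[0, 1, 2, 3], tuple[int, int], list[tuple[int, int]]]:
--     if rot < 0:
--         rot = 3
--     rot = rot % 4
--
--     between_list: list[tuple[int, int]] = []
--     match rot:
--         case 0:
--             for i in range(amount):
--                 between_list.append((loc[0] + i, loc[1]))
--
--             loc = (loc[0] + amount, loc[1])
--         case 1:
--             for i in range(amount):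
--                 between_list.append((loc[0], loc[1] + i))
--             loc = (loc[0], loc[1] + amount)
--         case 2:
--             for i in range(amount):
--                 between_list.append((loc[0] - i, loc[1]))
--             loc = (loc[0] - amount, loc[1])
--         case 3:
--             for i in range(amount):
--                 between_list.append((loc[0], loc[1] - i))
--             loc = (loc[0], loc[1] - amount)
--         case _:
--             raise NotImplementedError
--
--     return rot, loc, between_list
-- ===== SOURCE B (Python) =====
-- def tuple_xy_add(rot: int, amount: int, loc: tuple[int, int]):
--     if rot < 0:
--         rot = 3
--     rot = rot % 4
--     # derive the unit direction algebraically: rotate (1,0) by 90 degrees rot times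
--     dx, dy = 1, 0
--     for _ in range(rot):
--         dx, dy = -dy, dx
--     # final location in closed form
--     fx, fy = loc[0] + dx * amount, loc[1] + dy * amount
--     # build the path BACK-TO-FRONT, stepping backwards from the final location, then reverse
--     between_list: list[tuple[int, int]] = []
--     bx, by = fx, fy
--     for _ in range(amount):
--         bx -= dx
--         by -= dy
--         between_list.append((bx, by))
--     between_list.reverse()
--     return rot, (fx, fy), between_list
-- ===== Notes on version B (the rewrite author's own statement) =====
-- stated objective: alternative
-- what changed: Instead of four unrolled per-direction forward append loops, B computes the unit direction by repeated algebraic 90-degree rotation of (1,0), the final location in closed form, and builds the path back-to-front by stepping backwards from the final location and reversing.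
import Mathlib
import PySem

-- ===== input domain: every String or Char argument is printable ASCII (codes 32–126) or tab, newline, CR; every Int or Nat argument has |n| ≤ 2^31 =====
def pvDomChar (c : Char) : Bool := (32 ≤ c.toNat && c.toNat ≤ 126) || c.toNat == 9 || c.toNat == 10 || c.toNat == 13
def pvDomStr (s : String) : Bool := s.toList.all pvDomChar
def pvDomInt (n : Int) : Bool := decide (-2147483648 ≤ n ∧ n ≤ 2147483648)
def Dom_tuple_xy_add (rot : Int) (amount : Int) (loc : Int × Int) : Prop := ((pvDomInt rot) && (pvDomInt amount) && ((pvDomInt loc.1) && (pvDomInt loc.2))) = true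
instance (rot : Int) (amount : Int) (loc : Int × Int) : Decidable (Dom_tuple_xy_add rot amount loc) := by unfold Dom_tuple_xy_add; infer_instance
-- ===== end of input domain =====

-- B derives the direction by repeated 90° rotation of (1,0), takes the final location in closed
-- form, and builds the path back-to-front by stepping backwards from it, then reversing
-- (alternative decomposition; same cost).

-- ===== PORT A =====
-- literal port of A: normalize rot, then four match branches, each a forward append loop;
-- the 'case _: raise NotImplementedError' branch is unreachable (rot % 4 ∈ {0,1,2,3}),
-- so the final 'else' below corresponds to case 3 plus that unreachable default.
def tuple_xy_add (rot : Int) (amount : Int) (loc : Int × Int) : Int × (Int × Int) × (List (Int × Int)) :=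
  let rot1 : Int := if rot < 0 then 3 else rot
  let rot2 : Int := PySem.Int.mod rot1 4
  if rot2 = 0 then
    let bl := (PySem.List.pyRange 0 amount 1).foldl (fun acc i => acc ++ [(loc.1 + i, loc.2)]) []
    (rot2, (loc.1 + amount, loc.2), bl)
  else if rot2 = 1 then
    let bl := (PySem.List.pyRange 0 amount 1).foldl (fun acc i => acc ++ [(loc.1, loc.2 + i)]) []
    (rot2, (loc.1, loc.2 + amount), bl)
  else if rot2 = 2 then
    let bl := (PySem.List.pyRange 0 amount 1).foldl (fun acc i => acc ++ [(loc.1 - i, loc.2)]) []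
    (rot2, (loc.1 - amount, loc.2), bl)
  else
    let bl := (PySem.List.pyRange 0 amount 1).foldl (fun acc i => acc ++ [(loc.1, loc.2 - i)]) []
    (rot2, (loc.1, loc.2 - amount), bl)

-- ===== PORT B =====
-- literal port of Source B: dx,dy = 1,0 rotated 90° rot2 times; fin = closed-form final location;
-- backward walk from fin appending each position; reverse at the end.
def tuple_xy_add_alt (rot : Int) (amount : Int) (loc : Int × Int) : Int × (Int × Int) × (List (Int × Int)) :=
  let rot1 : Int := if rot < 0 then 3 else rot
  let rot2 : Int := PySem.Int.mod rot1 4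
  let d : Int × Int := (PySem.List.pyRange 0 rot2 1).foldl (fun d _ => (-d.2, d.1)) (1, 0)
  let fin : Int × Int := (loc.1 + d.1 * amount, loc.2 + d.2 * amount)
  let back := (PySem.List.pyRange 0 amount 1).foldl
      (fun (s : (Int × Int) × List (Int × Int)) _ =>
        ((s.1.1 - d.1, s.1.2 - d.2), s.2 ++ [(s.1.1 - d.1, s.1.2 - d.2)])) (fin, [])
  (rot2, fin, back.2.reverse)

-- ===== PRECONDITION & SPEC =====
def Spec_tuple_xy_add (rot : Int) (amount : Int) (loc : Int × Int) (out : Int × (Int × Int) × (List (Int × Int))) : Prop := out = tuple_xy_add_alt rot amount loc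
instance (rot : Int) (amount : Int) (loc : Int × Int) (out : Int × (Int × Int) × (List (Int × Int))) : Decidable (Spec_tuple_xy_add rot amount loc out) := by unfold Spec_tuple_xy_add; infer_instance

-- ===== CLAIM (what is proved, stated in full; the proofs are below) =====
def Claim_equal_tuple_xy_add : Prop := ∀ (rot : Int) (amount : Int) (loc : Int × Int), Dom_tuple_xy_add rot amount loc → Spec_tuple_xy_add rot amount loc (tuple_xy_add rot amount loc)

-- ===== LEMMAS AND PROOFS =====

theorem mod_four_emod (r : Int) : PySem.Int.mod r 4 = r % 4 := by
  simp [PySem.Int.mod, Int.fmod_eq_emod]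

theorem pyRangeCast (amount : Int) :
    PySem.List.pyRange 0 amount 1 = (List.range amount.toNat).map (fun (k : Nat) => (k : Int)) := by
  by_cases h : amount ≤ 0
  · rw [PySem.List.pyRange_one_eq_nil h, show amount.toNat = 0 by omega]; rfl
  · rw [show amount = ((amount.toNat : Nat) : Int) by omega, PySem.List.pyRange_zero_nat,
      Int.toNat_natCast]

-- B's backward walk: the step ignores the loop index, so characterise it over any list
theorem back_walk (dx dy : Int) {α : Type} (L : List α) (p q : Int) (acc : List (Int × Int)) :
    (L.foldl (fun (s : (Int × Int) × List (Int × Int)) _ =>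
        ((s.1.1 - dx, s.1.2 - dy), s.2 ++ [(s.1.1 - dx, s.1.2 - dy)])) ((p, q), acc)).2
      = acc ++ (List.range L.length).map (fun (k : Nat) => (p - dx * ((k : Int) + 1), q - dy * ((k : Int) + 1))) := by
  induction L generalizing p q acc with
  | nil => simp
  | cons a l ih =>
      rw [List.foldl_cons, ih]
      simp only [List.length_cons, List.range_succ_eq_map, List.map_cons, List.map_map,
        List.append_assoc, List.singleton_append]
      congr 1
      congr 1
      · simp only [Prod.mk.injEq]
        push_cast
        constructor <;> ring
      congr 1
      funext k
      simp only [Function.comp_apply, Prod.mk.injEq]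
      push_cast
      constructor <;> ring

-- reversing the backward-walk list gives the forward list
theorem rev_back (dx dy x y : Int) (n : Nat) :
    ((List.range n).map (fun (k : Nat) =>
        (x + dx * (n : Int) - dx * ((k : Int) + 1), y + dy * (n : Int) - dy * ((k : Int) + 1)))).reverse
      = (List.range n).map (fun (k : Nat) => (x + dx * (k : Int), y + dy * (k : Int))) := by
  apply List.ext_getElem
  · simp
  · intro j h1 h2
    simp only [List.length_map, List.length_range] at h2
    rw [List.getElem_reverse]
    simp only [List.length_map, List.length_range, List.getElem_map, List.getElem_range]
    have hc : ((n - 1 - j : Nat) : Int) = (n : Int) - 1 - j := by omega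
    rw [hc]
    simp only [Prod.mk.injEq]
    constructor <;> ring

-- B's between_list for an arbitrary delta (dx,dy) equals the forward map
theorem blist (dx dy x y amount : Int) :
    (((PySem.List.pyRange 0 amount 1).foldl
        (fun (s : (Int × Int) × List (Int × Int)) _ =>
          ((s.1.1 - dx, s.1.2 - dy), s.2 ++ [(s.1.1 - dx, s.1.2 - dy)]))
        ((x + dx * amount, y + dy * amount), [])).2).reverse
      = (PySem.List.pyRange 0 amount 1).map (fun i => (x + dx * i, y + dy * i)) := by
  rw [pyRangeCast, back_walk, List.nil_append, List.map_map, List.length_map, List.length_range]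
  by_cases h : amount ≤ 0
  · rw [show amount.toNat = 0 by omega]; rfl
  · rw [show amount = ((amount.toNat : Nat) : Int) by omega, Int.toNat_natCast, rev_back]
    rfl

-- ===== VERDICT (by name: the statement is the Claim_ definition above) =====
theorem tuple_xy_add_spec : Claim_equal_tuple_xy_add := by
  intro rot amount loc _
  unfold Spec_tuple_xy_add tuple_xy_add tuple_xy_add_alt
  set r : Int := if rot < 0 then 3 else rot with hr
  have h0 : 0 ≤ r := by rw [hr]; split <;> omega
  simp only [mod_four_emod]
  have hm : r % 4 = 0 ∨ r % 4 = 1 ∨ r % 4 = 2 ∨ r % 4 = 3 := by omega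
  rcases hm with hm | hm | hm | hm <;> rw [hm]
  · rw [if_pos rfl]
    rw [show (PySem.List.pyRange 0 (0:Int) 1).foldl (fun (d : Int × Int) _ => (-d.2, d.1)) (1, 0) = ((1:Int), (0:Int)) from by decide]
    refine congrArg (Prod.mk 0) ?_
    refine Prod.ext ?_ ?_
    · simp only; ring_nf
    · simp only
      rw [PySem.List.foldl_append_singleton_eq_map (fun i => (loc.1 + i, loc.2)) _ [], List.nil_append,
        show (fun i : Int => (loc.1 + i, loc.2)) = (fun i : Int => (loc.1 + 1 * i, loc.2 + 0 * i)) from by funext i; norm_num,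
        ← blist]
  · rw [if_neg (by norm_num), if_pos rfl]
    rw [show (PySem.List.pyRange 0 (1:Int) 1).foldl (fun (d : Int × Int) _ => (-d.2, d.1)) (1, 0) = ((0:Int), (1:Int)) from by decide]
    refine congrArg (Prod.mk 1) ?_
    refine Prod.ext ?_ ?_
    · simp only; ring_nf
    · simp only
      rw [PySem.List.foldl_append_singleton_eq_map (fun i => (loc.1, loc.2 + i)) _ [], List.nil_append,
        show (fun i : Int => (loc.1, loc.2 + i)) = (fun i : Int => (loc.1 + 0 * i, loc.2 + 1 * i)) from by funext i; norm_num,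
        ← blist]
  · rw [if_neg (by norm_num), if_neg (by norm_num), if_pos rfl]
    rw [show (PySem.List.pyRange 0 (2:Int) 1).foldl (fun (d : Int × Int) _ => (-d.2, d.1)) (1, 0) = ((-1:Int), (0:Int)) from by decide]
    refine congrArg (Prod.mk 2) ?_
    refine Prod.ext ?_ ?_
    · simp only; ring_nf
    · simp only
      rw [PySem.List.foldl_append_singleton_eq_map (fun i => (loc.1 - i, loc.2)) _ [], List.nil_append,
        show (fun i : Int => (loc.1 - i, loc.2)) = (fun i : Int => (loc.1 + (-1) * i, loc.2 + 0 * i)) from by funext i; ring_nf,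
        ← blist]
  · rw [if_neg (by norm_num), if_neg (by norm_num), if_neg (by norm_num)]
    rw [show (PySem.List.pyRange 0 (3:Int) 1).foldl (fun (d : Int × Int) _ => (-d.2, d.1)) (1, 0) = ((0:Int), (-1:Int)) from by decide]
    refine congrArg (Prod.mk 3) ?_
    refine Prod.ext ?_ ?_
    · simp only; ring_nf
    · simp only
      rw [PySem.List.foldl_append_singleton_eq_map (fun i => (loc.1, loc.2 - i)) _ [], List.nil_append,
        show (fun i : Int => (loc.1, loc.2 - i)) = (fun i : Int => (loc.1 + 0 * i, loc.2 + (-1) * i)) from by funext i; ring_nf,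
        ← blist]
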